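-- pv_equiv track=rewrite | github.com/preferchoi/algorithm | programmers/LV.2/귤 고르기.py | solution
-- ===== SOURCE A (Python) =====
-- def solution(k, tangerine):
--     answer = 0
--     tmp = {}
--     for i in tangerine:
--         if i in tmp.keys():
--             tmp[i] += 1
--         else:
--             tmp[i] = 1
--
--     tmp = list(tmp.values())
--     tmp.sort(reverse=True)
--     tmp2 = 0
--     for i in tmp:
--         tmp2 += i
--         answer += 1
--         if tmp2 >= k:
--             break
--     return answer
-- ===== SOURCE B (Python) =====
-- def solution(k, tangerine):
--     freq = {}
--     for t in tangerine:
--         freq[t] = freq.get(t, 0) + 1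
--     counts = list(freq.values())
--     if not counts:
--         return 0
--     maxc = max(counts)
--     bucket = [0] * (maxc + 1)
--     for c in counts:
--         bucket[c] += 1
--     total = 0
--     answer = 0
--     for c in range(maxc, 0, -1):
--         for _ in range(bucket[c]):
--             total += c
--             answer += 1
--             if total >= k:
--                 return answer
--     return answer
-- ===== Notes on version B (the rewrite author's own statement) =====
-- stated objective: alternative
-- what changed: Replaces the comparison sort of the distinct-type counts with a counting-sort bucket array traversed from the largest count down, taking types greedily until the running sum reaches k.
import Mathlib
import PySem

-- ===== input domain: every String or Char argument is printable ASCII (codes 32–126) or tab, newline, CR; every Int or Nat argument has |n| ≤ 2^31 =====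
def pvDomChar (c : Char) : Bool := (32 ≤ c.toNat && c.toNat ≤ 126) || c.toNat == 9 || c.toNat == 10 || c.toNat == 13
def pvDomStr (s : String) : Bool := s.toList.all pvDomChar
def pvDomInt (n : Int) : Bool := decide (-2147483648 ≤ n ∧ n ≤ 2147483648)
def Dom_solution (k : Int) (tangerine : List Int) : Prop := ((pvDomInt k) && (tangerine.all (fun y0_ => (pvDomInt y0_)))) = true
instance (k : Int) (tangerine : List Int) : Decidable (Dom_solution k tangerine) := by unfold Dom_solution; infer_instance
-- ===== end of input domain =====

-- B replaces A's comparison sort of the distinct-type counts with a counting-sort bucket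
-- traversal from the largest count down (alternative algorithm, same results).

-- ===== PORT A =====
-- counting loop: 'if i in tmp.keys(): tmp[i] += 1 else: tmp[i] = 1'
-- ('tmp[i] + 1' is ported as 'd.getD i 0 + 1'; exact, since the branch guarantees the key is present)
def solACount (tangerine : List Int) : PySem.Dict Int Int :=
  tangerine.foldl
    (fun d i => if d.contains i then d.insert i (d.getD i 0 + 1) else d.insert i 1)
    PySem.Dict.empty

-- 'for i in tmp: tmp2 += i; answer += 1; if tmp2 >= k: break'
def solALoop (k : Int) : List Int → Int → Int → Int
  | [], _, answer => answer
  | i :: rest, tmp2, answer =>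
    let tmp2' := tmp2 + i
    let answer' := answer + 1
    if tmp2' ≥ k then answer' else solALoop k rest tmp2' answer'

def solution (k : Int) (tangerine : List Int) : Int :=
  let tmp := solACount tangerine
  let tmpv := PySem.List.sorted tmp.values (fun x => x) (reverse := true)
  solALoop k tmpv 0 0

-- ===== PORT B =====
-- 'freq[t] = freq.get(t, 0) + 1'
def solAltCounter (tangerine : List Int) : PySem.Dict Int Int :=
  tangerine.foldl (fun d t => d.insert t (d.getD t 0 + 1)) PySem.Dict.empty

-- inner 'for _ in range(bucket[c])' with the early 'return answer' signalled by 'some'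
def solAltInner (k c : Int) : Nat → Int → Int → Option Int × Int × Int
  | 0, total, answer => (none, total, answer)
  | n+1, total, answer =>
    let total' := total + c
    let answer' := answer + 1
    if total' ≥ k then (some answer', total', answer')
    else solAltInner k c n total' answer'

-- outer 'for c in range(maxc, 0, -1)'
def solAltOuter (k : Int) (bucket : List Int) : List Int → Int → Int → Int
  | [], _, answer => answer
  | c :: cs, total, answer =>
    match solAltInner k c (PySem.List.pyGetD bucket c 0).toNat total answer with
    | (some r, _, _) => r
    | (none, total', answer') => solAltOuter k bucket cs total' answer'

def solution_alt (k : Int) (tangerine : List Int) : Int :=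
  let counts := (solAltCounter tangerine).values
  if counts = [] then 0
  else
    -- max(counts): counts is nonempty here, so the .getD 0 default is never used
    let maxc := (PySem.List.max? counts (fun x => x)).getD 0
    let bucket0 := List.replicate (maxc + 1).toNat (0 : Int)
    -- 'bucket[c] += 1' (each count c satisfies 1 ≤ c ≤ maxc, so indexing is exact)
    let bucket := counts.foldl
      (fun b c => PySem.List.pySetD b c (PySem.List.pyGetD b c 0 + 1)) bucket0
    solAltOuter k bucket (PySem.List.pyRange maxc 0 (-1)) 0 0

-- ===== PRECONDITION & SPEC =====
def Spec_solution (k : Int) (tangerine : List Int) (out : Int) : Prop := out = solution_alt k tangerine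
instance (k : Int) (tangerine : List Int) (out : Int) : Decidable (Spec_solution k tangerine out) := by unfold Spec_solution; infer_instance

-- ===== CLAIM (what is proved, stated in full; the proofs are below) =====
def Claim_equal_solution : Prop := ∀ (k : Int) (tangerine : List Int), Dom_solution k tangerine → Spec_solution k tangerine (solution k tangerine)

-- ===== LEMMAS AND PROOFS =====

-- the two counting loops build the same dict
theorem countEq (tangerine : List Int) : solACount tangerine = solAltCounter tangerine := by
  unfold solACount solAltCounter
  congr 1
  funext d i
  by_cases h : d.contains i
  · simp [h]
  · have h' : d.contains i = false := by simpa using h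
    simp [h, PySem.Dict.getD_of_not_contains _ _ h']

theorem values_counter (xs : List Int) :
    (PySem.Dict.counter xs).values
      = (PySem.Set.ofList xs).map (fun x => ((xs.count x : Int))) := by
  simp only [PySem.Dict.values, PySem.Dict.items_counter, List.map_map]
  rfl

-- bucket[c] += 1 loop: final lookup = initial lookup + count
theorem bucket_getD : ∀ (l : List Int) (b0 : List Int),
    (∀ v ∈ l, 0 ≤ v ∧ v < (b0.length : Int)) → ∀ j : Int, 0 ≤ j →
    PySem.List.pyGetD
        (l.foldl (fun b c => PySem.List.pySetD b c (PySem.List.pyGetD b c 0 + 1)) b0) j 0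
      = PySem.List.pyGetD b0 j 0 + (l.count j : Int) := by
  intro l
  induction l with
  | nil => intro b0 _ j _; simp
  | cons v l ih =>
    intro b0 hl j hj
    have hv := hl v (List.mem_cons_self)
    simp only [List.foldl_cons]
    rw [ih _ (fun w hw => by
          have := hl w (List.mem_cons_of_mem _ hw)
          simpa [PySem.List.length_pySetD] using this) j hj]
    have hstep : PySem.List.pyGetD (PySem.List.pySetD b0 v (PySem.List.pyGetD b0 v 0 + 1)) j 0
        = PySem.List.pyGetD b0 j 0 + (if v = j then 1 else 0) := by
      rw [PySem.List.pySetD_of_nonneg _ _ hv.1, PySem.List.pyGetD_of_nonneg _ _ hj,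
          PySem.List.pyGetD_of_nonneg _ _ hj]
      by_cases hje : j = v
      · subst hje
        have hlt : j.toNat < b0.length := by omega
        rw [List.getD_eq_getElem?_getD, List.getElem?_set_self hlt, Option.getD_some]
        rw [PySem.List.pyGetD_of_nonneg _ _ hv.1, List.getD_eq_getElem?_getD]
        simp
      · have hne : v.toNat ≠ j.toNat := by omega
        rw [List.getD_eq_getElem?_getD, List.getElem?_set_ne hne, ← List.getD_eq_getElem?_getD]
        rw [if_neg (fun h => hje (Eq.symm h))]
        simp
    rw [hstep, List.count_cons]
    by_cases hvj : v = j
    · simp [hvj]; ring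
    · simp [hvj]

-- count of an element in the bucket expansion
theorem count_expand (f : Int → Nat) : ∀ (cs : List Int), cs.Nodup → ∀ x : Int,
    (cs.flatMap (fun c => List.replicate (f c) c)).count x
      = if x ∈ cs then f x else 0 := by
  intro cs
  induction cs with
  | nil => simp
  | cons c cs ih =>
    intro hnd x
    have hc : c ∉ cs := (List.nodup_cons.mp hnd).1
    rw [List.flatMap_cons, List.count_append, List.count_replicate,
        ih (List.nodup_cons.mp hnd).2 x]
    by_cases hx : x = c
    · subst hx; simp [hc]
    · have h1 : (c == x) = false := beq_eq_false_iff_ne.mpr (fun h => hx (Eq.symm h))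
      simp [hx, h1]

-- the bucket expansion is descending
theorem pairwise_expand (f : Int → Nat) : ∀ (cs : List Int),
    cs.Pairwise (fun a b => b < a) →
    (cs.flatMap (fun c => List.replicate (f c) c)).Pairwise (fun a b : Int => b ≤ a) := by
  intro cs
  induction cs with
  | nil => simp
  | cons c cs ih =>
    intro hp
    rw [List.flatMap_cons, List.pairwise_append]
    refine ⟨List.pairwise_replicate.mpr (Or.inr le_rfl), ih (List.pairwise_cons.mp hp).2, ?_⟩
    intro a ha b hb
    rw [List.eq_of_mem_replicate ha]
    rcases List.mem_flatMap.mp hb with ⟨c', hc', hb'⟩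
    rw [List.eq_of_mem_replicate hb']
    exact le_of_lt ((List.pairwise_cons.mp hp).1 c' hc')

theorem inner_eq (k c : Int) : ∀ (n : Nat) (total answer : Int) (rest : List Int),
    (match solAltInner k c n total answer with
     | (some r, _, _) => r
     | (none, t, a) => solALoop k rest t a)
      = solALoop k (List.replicate n c ++ rest) total answer := by
  intro n
  induction n with
  | zero => intro total answer rest; simp [solAltInner]
  | succ n ih =>
    intro total answer rest
    rw [List.replicate_succ, List.cons_append]
    show _ = solALoop k (c :: (List.replicate n c ++ rest)) total answer
    simp only [solAltInner, solALoop]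
    by_cases h : total + c ≥ k
    · simp [h]
    · simp [h, ih]

theorem outer_eq (k : Int) (bucket : List Int) : ∀ (cs : List Int) (total answer : Int),
    solAltOuter k bucket cs total answer
      = solALoop k
          (cs.flatMap fun c => List.replicate (PySem.List.pyGetD bucket c 0).toNat c)
          total answer := by
  intro cs
  induction cs with
  | nil => intro total answer; simp [solAltOuter, solALoop]
  | cons c cs ih =>
    intro total answer
    rw [List.flatMap_cons, ← inner_eq k c _ total answer _]
    show solAltOuter k bucket (c :: cs) total answer = _
    simp only [solAltOuter]
    rcases hi : solAltInner k c (PySem.List.pyGetD bucket c 0).toNat total answer with ⟨o, t, a⟩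
    cases o with
    | some r => rfl
    | none => exact ih t a

theorem main_eq (k : Int) (tangerine : List Int) :
    solution k tangerine = solution_alt k tangerine := by
  have hL : solution k tangerine
      = solALoop k (PySem.List.sorted (solAltCounter tangerine).values (fun x => x) true) 0 0 := by
    have : solution k tangerine
        = solALoop k (PySem.List.sorted (solACount tangerine).values (fun x => x) true) 0 0 := rfl
    rw [this, countEq]
  have hR : solution_alt k tangerine
      = (if (solAltCounter tangerine).values = [] then 0
         else solAltOuter k
           ((solAltCounter tangerine).values.foldl
             (fun b c => PySem.List.pySetD b c (PySem.List.pyGetD b c 0 + 1))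
             (List.replicate (((PySem.List.max? (solAltCounter tangerine).values (fun x => x)).getD 0) + 1).toNat (0 : Int)))
           (PySem.List.pyRange ((PySem.List.max? (solAltCounter tangerine).values (fun x => x)).getD 0) 0 (-1)) 0 0) := rfl
  rw [hL, hR]
  have hcv : (solAltCounter tangerine).values
      = (PySem.Set.ofList tangerine).map (fun x => ((tangerine.count x : Int))) := by
    have h1 : solAltCounter tangerine = PySem.Dict.counter tangerine :=
      PySem.Dict.foldl_insert_getD_add_one_eq_counter tangerine
    rw [h1, values_counter]
  set vs := (solAltCounter tangerine).values with hvs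
  by_cases hnil : vs = []
  · rw [if_pos hnil, hnil]
    rfl
  · rw [if_neg hnil]
    obtain ⟨m, hm⟩ : ∃ m, PySem.List.max? vs (fun x => x) = some m := by
      cases h : PySem.List.max? vs (fun x => x) with
      | none => exact absurd ((PySem.List.max?_eq_none_iff vs _).mp h) hnil
      | some m => exact ⟨m, rfl⟩
    simp only [hm, Option.getD_some]
    have hpos : ∀ v ∈ vs, 1 ≤ v := by
      intro v hv
      rw [hcv] at hv
      rcases List.mem_map.mp hv with ⟨x, hx, rfl⟩
      have : 0 < tangerine.count x :=
        List.count_pos_iff.mpr ((PySem.Set.mem_ofList _ _).mp hx)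
      exact_mod_cast this
    have hle : ∀ v ∈ vs, v ≤ m := PySem.List.max?_isMax hm
    have hm1 : 1 ≤ m := hpos m (PySem.List.max?_mem hm)
    set b0 := List.replicate (m + 1).toNat (0 : Int) with hb0
    have hlen : (b0.length : Int) = m + 1 := by
      rw [hb0, List.length_replicate]; omega
    set bucket := vs.foldl
      (fun b c => PySem.List.pySetD b c (PySem.List.pyGetD b c 0 + 1)) b0 with hbk
    have hbg : ∀ j : Int, 0 ≤ j → PySem.List.pyGetD bucket j 0 = (vs.count j : Int) := by
      intro j hj
      rw [hbk, bucket_getD vs b0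
            (fun v hv => ⟨by have := hpos v hv; omega, by rw [hlen]; have := hle v hv; omega⟩)
            j hj]
      rw [PySem.List.pyGetD_of_nonneg _ _ hj, hb0]
      rw [List.getD_eq_getElem?_getD, List.getElem?_replicate]
      by_cases hc : j.toNat < (m + 1).toNat <;> simp [hc]
    have hndr : (PySem.List.pyRange m 0 (-1)).Nodup := by
      rw [PySem.List.pyRange_neg_one_eq_reverse]
      exact List.nodup_reverse.mpr (PySem.List.nodup_pyRange_one _ _)
    have hgt : (PySem.List.pyRange m 0 (-1)).Pairwise (fun a b => b < a) := by
      rw [PySem.List.pyRange_neg_one_eq_reverse]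
      exact List.pairwise_reverse.mpr (PySem.List.pairwise_lt_pyRange_one _ _)
    have hkey : PySem.List.sorted vs (fun x => x) true
        = (PySem.List.pyRange m 0 (-1)).flatMap
            (fun c => List.replicate (PySem.List.pyGetD bucket c 0).toNat c) := by
      apply List.eq_of_perm_of_sorted (le := fun a b : Int => b ≤ a)
      · exact fun a b _ _ h1 h2 => le_antisymm h2 h1
      · exact PySem.List.sorted_pairwise_rev vs _
      · exact pairwise_expand _ _ hgt
      · apply List.perm_iff_count.mpr
        intro x
        rw [(PySem.List.sorted_perm vs (fun x => x) true).count_eq,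
            count_expand _ _ hndr x]
        by_cases hx : x ∈ PySem.List.pyRange m 0 (-1)
        · have hx' := PySem.List.mem_pyRange_neg_one.mp hx
          rw [if_pos hx, hbg x (by omega)]
          simp
        · rw [if_neg hx]
          refine List.count_eq_zero.mpr ?_
          intro hmem
          exact hx (PySem.List.mem_pyRange_neg_one.mpr ⟨by have := hpos x hmem; omega, hle x hmem⟩)
    rw [hkey, outer_eq]

-- ===== VERDICT (by name: the statement is the Claim_ definition above) =====
theorem solution_spec : Claim_equal_solution := by
  unfold Claim_equal_solution Spec_solution
  exact fun k tangerine _ => main_eq k tangerine
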